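-- pv_equiv track=rewrite | github.com/GorVoskanyan/Python1245 | modules.py | new_sentence
-- ===== SOURCE A (Python) =====
-- def new_sentence(sentence, lst):
--     new_text = ''
--     index = -1
--     for i in sentence:
--         if i == '_':
--             index += 1
--             new_text += lst[index]
--         else:
--             new_text += i
--     return new_text
-- ===== SOURCE B (Python) =====
-- def new_sentence(sentence, lst):
--     parts = sentence.split('_')
--     pieces = [parts[0]]
--     for i, part in enumerate(parts[1:], 1):
--         pieces.append(lst[i - 1])
--         pieces.append(part)
--     return ''.join(pieces)
-- ===== Notes on version B (the rewrite author's own statement) =====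
-- stated objective: alternative
-- what changed: Instead of a char-by-char loop that appends to the result while tracking an underscore counter, B splits the sentence on '_' once and joins the fragments interleaved with lst elements via ''.join.
import Mathlib
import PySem

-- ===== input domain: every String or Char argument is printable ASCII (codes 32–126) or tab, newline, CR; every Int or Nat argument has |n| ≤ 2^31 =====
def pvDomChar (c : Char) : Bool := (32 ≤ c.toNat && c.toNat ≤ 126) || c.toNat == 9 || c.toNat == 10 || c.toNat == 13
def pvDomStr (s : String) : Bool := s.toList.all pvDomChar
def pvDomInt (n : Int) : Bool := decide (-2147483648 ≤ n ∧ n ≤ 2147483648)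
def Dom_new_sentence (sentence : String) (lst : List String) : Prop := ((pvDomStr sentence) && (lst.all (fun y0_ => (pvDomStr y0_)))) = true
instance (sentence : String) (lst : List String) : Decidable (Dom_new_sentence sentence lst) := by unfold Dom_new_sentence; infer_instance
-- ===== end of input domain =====

-- B replaces A's char-by-char accumulation (with an underscore counter) by split('_') + join
-- interleaved with lst elements: a different decomposition, same exact values (objective: alternative).


-- ===== PORT A =====
-- for i in sentence: if i == '_': index += 1; new_text += lst[index] else new_text += i
-- lst[index] is ported with pyGetD (default ""); Pre_ below guarantees the index is in range,
-- so the default is never read on admitted inputs.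
def new_sentence (sentence : String) (lst : List String) : String :=
  String.ofList
    (sentence.toList.foldl
      (fun (st : List Char × Int) i =>
        if i = '_' then (st.1 ++ (PySem.List.pyGetD lst (st.2 + 1) "").toList, st.2 + 1)
        else (st.1 ++ [i], st.2))
      ([], -1)).1

-- ===== PORT B =====
-- parts = sentence.split('_'); pieces = [parts[0]]; for i, part in enumerate(parts[1:], 1):
-- pieces += [lst[i-1], part]; return ''.join(pieces)
def new_sentence_alt (sentence : String) (lst : List String) : String :=
  String.ofList (PySem.Chars.join []
    (((PySem.List.enumerate (PySem.List.slice (sentence.toList.splitOn '_') (some 1) none) 1).foldl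
      (fun (acc : List (List Char)) ip =>
        acc ++ [(PySem.List.pyGetD lst (ip.1 - 1) "").toList, ip.2])
      [PySem.List.pyGetD (sentence.toList.splitOn '_') 0 []])))

-- ===== PRECONDITION & SPEC =====
-- Pre_ excludes exactly the inputs where Python A raises IndexError: more underscores than lst elements.
def Pre_new_sentence (sentence : String) (lst : List String) : Prop :=
  sentence.toList.count '_' ≤ lst.length
instance (sentence : String) (lst : List String) : Decidable (Pre_new_sentence sentence lst) := by
  unfold Pre_new_sentence; infer_instance
def pvWitness_new_sentence : String × List String := ("a_b_c", ["X", "Y"])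

def Spec_new_sentence (sentence : String) (lst : List String) (out : String) : Prop := out = new_sentence_alt sentence lst
instance (sentence : String) (lst : List String) (out : String) : Decidable (Spec_new_sentence sentence lst out) := by unfold Spec_new_sentence; infer_instance

-- ===== CLAIM (what is proved, stated in full; the proofs are below) =====
def Claim_equal_new_sentence : Prop := ∀ (sentence : String) (lst : List String), Dom_new_sentence sentence lst → Pre_new_sentence sentence lst → Spec_new_sentence sentence lst (new_sentence sentence lst)

-- ===== LEMMAS AND PROOFS =====

-- common specification of the replacement, consuming lst from the front
def gSpec : List Char → List String → List Char
  | [], _ => []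
  | c :: cs, l => if c = '_' then (l.headD "").toList ++ gSpec cs l.tail else c :: gSpec cs l

lemma getD_eq_headD_drop {α : Type} (xs : List α) (k : Nat) (d : α) :
    xs.getD k d = (xs.drop k).headD d := by
  simp [List.getD, List.head?_drop]

lemma A_loop (lst : List String) (cs : List Char) :
    ∀ (acc : List Char) (k : Nat),
      (cs.foldl
        (fun (st : List Char × Int) i =>
          if i = '_' then (st.1 ++ (PySem.List.pyGetD lst (st.2 + 1) "").toList, st.2 + 1)
          else (st.1 ++ [i], st.2))
        (acc, (k : Int) - 1)).1 = acc ++ gSpec cs (lst.drop k) := by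
  induction cs with
  | nil => intro acc k; simp [gSpec]
  | cons c cs ih =>
    intro acc k
    by_cases hc : c = '_'
    · have hidx : (k : Int) - 1 + 1 = ((k : Int)) := by ring
      have hget : PySem.List.pyGetD lst ((k : Int)) "" = (lst.drop k).headD "" := by
        rw [PySem.List.pyGetD_natCast, getD_eq_headD_drop]
      have hstep : ((k : Int) - 1 + 1) = ((k + 1 : Nat) : Int) - 1 := by push_cast; ring
      simp only [List.foldl_cons, hc, hidx, hget, reduceIte]
      have hstep' : ((k : Int)) = ((k + 1 : Nat) : Int) - 1 := by push_cast; ring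
      rw [hstep', ih]
      simp [gSpec, List.tail_drop]
    · simp only [List.foldl_cons, if_neg hc]
      rw [ih]
      simp [gSpec, hc]

def interleave : List (List Char) → List String → List (List Char)
  | [], _ => []
  | p :: ps, l => (l.headD "").toList :: p :: interleave ps l.tail

lemma B_loop (lst : List String) (ps : List (List Char)) :
    ∀ (acc : List (List Char)) (k : Nat),
      (PySem.List.enumerate ps ((k : Int) + 1)).foldl
        (fun (acc : List (List Char)) ip =>
          acc ++ [(PySem.List.pyGetD lst (ip.1 - 1) "").toList, ip.2]) acc
      = acc ++ interleave ps (lst.drop k) := by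
  induction ps with
  | nil => intro acc k; simp [PySem.List.enumerate_nil, interleave]
  | cons p ps ih =>
    intro acc k
    rw [PySem.List.enumerate_cons]
    have hidx : (k : Int) + 1 - 1 = ((k : Int)) := by ring
    have hget : PySem.List.pyGetD lst ((k : Int)) "" = (lst.drop k).headD "" := by
      rw [PySem.List.pyGetD_natCast, getD_eq_headD_drop]
    have hstep : ((k : Int) + 1 + 1) = ((k + 1 : Nat) : Int) + 1 := by push_cast; ring
    simp only [List.foldl_cons, hidx, hget]
    rw [hstep, ih]
    simp [interleave, List.tail_drop]

lemma join_nil_eq_flatten (pss : List (List Char)) :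
    PySem.Chars.join [] pss = pss.flatten := by
  simp [PySem.Chars.join, List.intercalate]
  induction pss with
  | nil => simp
  | cons p ps ih =>
    cases ps with
    | nil => simp [List.intersperse]
    | cons q qs => simpa [List.intersperse] using ih

lemma splitOn_underscore_cons (cs : List Char) :
    ('_' :: cs).splitOn '_' = [] :: cs.splitOn '_' := by
  simp [List.splitOn, List.splitOnP_cons]

lemma splitOn_other_cons (c : Char) (cs : List Char) (h : c ≠ '_') :
    (c :: cs).splitOn '_' = (cs.splitOn '_').modifyHead (c :: ·) := by
  simp [List.splitOn, List.splitOnP_cons, h]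

lemma main_bridge (cs : List Char) :
    ∀ lst : List String,
      (cs.splitOn '_').headD [] ++ (interleave (cs.splitOn '_').tail lst).flatten
      = gSpec cs lst := by
  induction cs with
  | nil => intro lst; simp [List.splitOn, gSpec, interleave]
  | cons c cs ih =>
    intro lst
    by_cases hc : c = '_'
    · subst hc
      rw [splitOn_underscore_cons]
      obtain ⟨hd, tl, hsp⟩ := List.exists_cons_of_ne_nil (List.splitOnP_ne_nil (· == '_') cs)
      have := ih lst.tail
      rw [show cs.splitOn '_' = hd :: tl from hsp] at this ⊢
      simp only [List.headD_cons, List.tail_cons, interleave, List.flatten_cons, gSpec]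
      simp only [List.headD_cons, List.tail_cons] at this
      simp [← this]
    · rw [splitOn_other_cons c cs hc]
      obtain ⟨hd, tl, hsp⟩ := List.exists_cons_of_ne_nil (List.splitOnP_ne_nil (· == '_') cs)
      have := ih lst
      rw [show cs.splitOn '_' = hd :: tl from hsp] at this ⊢
      simp only [List.modifyHead_cons, List.headD_cons, List.tail_cons, gSpec, if_neg hc]
      simp only [List.headD_cons, List.tail_cons] at this
      simp [this]

lemma headD_eq_pyGetD (ps : List (List Char)) (h : ps ≠ []) :
    PySem.List.pyGetD ps 0 [] = ps.headD [] := by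
  cases ps with
  | nil => exact absurd rfl h
  | cons p ps => simp [PySem.List.pyGetD, PySem.List.pyIdx?, PySem.List.pyGet?]

-- ===== VERDICT (by name: the statement is the Claim_ definition above) =====
theorem new_sentence_spec : Claim_equal_new_sentence := by
  intro sentence lst _ _
  unfold Spec_new_sentence new_sentence new_sentence_alt
  have hA := A_loop lst sentence.toList [] 0
  simp only [Nat.cast_zero, zero_sub, List.drop_zero, List.nil_append] at hA
  rw [hA]
  have hne : sentence.toList.splitOn '_' ≠ [] := List.splitOnP_ne_nil _ _
  have hslice : PySem.List.slice (sentence.toList.splitOn '_') (some 1) none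
      = (sentence.toList.splitOn '_').tail := by
    rw [PySem.List.slice_from _ (by norm_num : (0:Int) ≤ 1)]
    simp [List.drop_one]
  have hB := B_loop lst (sentence.toList.splitOn '_').tail
      [PySem.List.pyGetD (sentence.toList.splitOn '_') 0 []] 0
  simp only [Nat.cast_zero, zero_add, List.drop_zero] at hB
  rw [hslice, hB, join_nil_eq_flatten, headD_eq_pyGetD _ hne]
  rw [List.cons_append, List.nil_append, List.flatten_cons, main_bridge sentence.toList lst]
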